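-- pv_equiv track=rewrite | github.com/py-AQA/python_hugs_group_74 | HW/Jan_Sha/Count_Queue.py | queue_time2
-- ===== SOURCE A (Python) =====
-- def queue_time2(in_list: list, num: int) -> int:
--     kassa = [0, ] * num
--     for i in range(len(kassa)):
--         for j in range(i, len(in_list)):
--             rr = in_list[j::num]
--             kassa[i] += sum(in_list[j::num])
--             break
--
--     return max(kassa)
-- ===== SOURCE B (Python) =====
-- def queue_time2(in_list: list, num: int) -> int:
--     kassa = [0] * num
--     for idx, v in enumerate(in_list):
--         kassa[idx % num] += v
--     return max(kassa)
-- ===== Notes on version B (the rewrite author's own statement) =====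
-- stated objective: idiomatic
-- what changed: A fills each residue class by slicing in_list[i::num] inside a nested loop-with-break; B makes one enumerate pass accumulating each element into kassa[idx % num].
import Mathlib
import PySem

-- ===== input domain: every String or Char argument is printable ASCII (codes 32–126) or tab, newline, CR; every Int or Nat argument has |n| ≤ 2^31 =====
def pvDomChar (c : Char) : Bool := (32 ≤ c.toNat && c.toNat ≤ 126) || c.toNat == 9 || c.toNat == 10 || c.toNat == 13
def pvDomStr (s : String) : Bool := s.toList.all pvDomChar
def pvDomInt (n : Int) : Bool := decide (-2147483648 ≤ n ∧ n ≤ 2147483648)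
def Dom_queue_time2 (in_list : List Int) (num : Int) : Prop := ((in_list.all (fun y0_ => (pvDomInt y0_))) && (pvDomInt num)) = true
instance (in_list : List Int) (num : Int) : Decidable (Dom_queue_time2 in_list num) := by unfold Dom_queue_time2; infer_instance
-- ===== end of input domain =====

-- B replaces A's per-class slicing loops by one enumerate pass accumulating each element
-- into its residue class (objective: idiomatic single pass); same return value on Pre_.

-- ===== PORT A =====
-- literal port of A: kassa = [0]*num; for i in range(len(kassa)): inner loop over
-- range(i, len(in_list)) that executes at most its first iteration (the break),
-- adding sum(in_list[j::num]) to kassa[i]; finally max(kassa).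
def queue_time2 (in_list : List Int) (num : Int) : Int :=
  let kassa : List Int := List.replicate num.toNat 0   -- [0,]*num ([] for num ≤ 0)
  let kassa :=
    (PySem.List.pyRange 0 (PySem.List.len kassa) 1).foldl
      (fun k i =>
        match PySem.List.pyRange i (PySem.List.len in_list) 1 with
        | [] => k                                       -- inner for-loop body never runs
        | j :: _ =>                                      -- first iteration, then break
          PySem.List.pySetD k i (PySem.List.pyGetD k i 0 +
            ((PySem.List.slice? in_list (some j) none num).getD []).sum))
      kassa
  (PySem.List.max? kassa (fun y => y)).getD 0           -- max(kassa); empty excluded by Pre_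

-- ===== PORT B =====
-- literal port of Source B: one pass with enumerate, kassa[idx % num] += v, then max.
def queue_time2_alt (in_list : List Int) (num : Int) : Int :=
  let kassa : List Int := List.replicate num.toNat 0
  let kassa :=
    (PySem.List.enumerate in_list 0).foldl
      (fun k p =>
        let r := (PySem.Int.mod p.1 num).toNat   -- idx % num; Python-exact: ≥ 0 under Pre_ (num ≥ 1)
        k.set r (k.getD r 0 + p.2))
      kassa
  (PySem.List.max? kassa (fun y => y)).getD 0

-- ===== PRECONDITION & SPEC =====
-- Pre_ excludes num ≤ 0, where A raises (ValueError: max of empty kassa).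
def Pre_queue_time2 (in_list : List Int) (num : Int) : Prop := 1 ≤ num
instance (in_list : List Int) (num : Int) : Decidable (Pre_queue_time2 in_list num) := by
  unfold Pre_queue_time2; infer_instance
def pvWitness_queue_time2 : List Int × Int := ([1, 2, 3], 2)

def Spec_queue_time2 (in_list : List Int) (num : Int) (out : Int) : Prop := out = queue_time2_alt in_list num
instance (in_list : List Int) (num : Int) (out : Int) : Decidable (Spec_queue_time2 in_list num out) := by unfold Spec_queue_time2; infer_instance

-- ===== CLAIM (what is proved, stated in full; the proofs are below) =====
def Claim_equal_queue_time2 : Prop := ∀ (in_list : List Int) (num : Int), Dom_queue_time2 in_list num → Pre_queue_time2 in_list num → Spec_queue_time2 in_list num (queue_time2 in_list num)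

-- ===== LEMMAS AND PROOFS =====

-- reference: sum of xs[j], xs[j+n], xs[j+2n], … (structural on the list)
def sliceSum : List Int → Nat → Nat → Int
  | [], _, _ => 0
  | x :: xs, 0, n => x + sliceSum xs (n - 1) n
  | _ :: xs, j + 1, n => sliceSum xs j n

-- sum of the elements of x :: xs whose position p satisfies (s + p) % n = i
def accSum : List Int → Nat → Nat → Nat → Int
  | [], _, _, _ => 0
  | x :: xs, s, n, i => (if s % n = i then x else 0) + accSum xs (s + 1) n i

lemma sliceSum_ge (xs : List Int) : ∀ j n, xs.length ≤ j → sliceSum xs j n = 0 := by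
  induction xs with
  | nil => intro j n _; cases j <;> rfl
  | cons x t ih =>
    intro j n hj
    cases j with
    | zero => simp at hj
    | succ j => simpa [sliceSum] using ih j n (by simpa using hj)

lemma sliceSum_lt (xs : List Int) : ∀ j n, 0 < n → (hj : j < xs.length) →
    sliceSum xs j n = xs[j] + sliceSum xs (j + n) n := by
  induction xs with
  | nil => intro j n _ hj; simp at hj
  | cons x t ih =>
    intro j n hn hj
    cases j with
    | zero =>
      obtain ⟨m, rfl⟩ : ∃ m, n = m + 1 := ⟨n - 1, by omega⟩
      simp [sliceSum]
    | succ j =>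
      have := ih j n hn (by simpa using hj)
      simpa [sliceSum, Nat.succ_add] using this

lemma slice?_empty (xs : List Int) (n j : Nat) (hn : 0 < n) (hj : xs.length ≤ j) :
    PySem.List.slice? xs (some (j : Int)) none (n : Int) = some [] := by
  simp only [PySem.List.slice?, PySem.List.sliceIndices]
  rw [if_neg (by omega)]
  have h1 : ¬ ((n : Int) < 0) := by omega
  have h2 : ¬ ((j : Int) < 0) := by omega
  simp only [if_neg h1, if_neg h2]
  have hmin : min (j : Int) (xs.length : Int) = (xs.length : Int) := by omega
  rw [hmin]
  simp

lemma slice?_step (xs : List Int) (n j : Nat) (hn : 0 < n) (hj : j < xs.length) :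
    PySem.List.slice? xs (some (j : Int)) none (n : Int) =
      some (xs[j] :: (PySem.List.slice? xs (some ((j + n : Nat) : Int)) none (n : Int)).getD []) := by
  have hlen := hj
  simp only [PySem.List.slice?, PySem.List.sliceIndices]
  rw [if_neg (by omega), if_neg (by omega)]
  have h1 : ¬ ((n : Int) < 0) := by omega
  have h2 : ¬ ((j : Int) < 0) := by omega
  have h3 : ¬ (((j + n : Nat) : Int) < 0) := by omega
  simp only [if_neg h1, if_neg h3]
  have hminj : min (j : Int) (xs.length : Int) = (j : Int) := by omega
  rw [hminj]
  rw [if_pos (show (0:Int) < (n:Int) by omega), if_pos (show (j:Int) < (xs.length:Int) by omega)]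
  rw [if_neg (show ¬ ((n:Int) = 0) by omega), if_pos (show (0:Int) < (n:Int) by omega)]
  have hdiv : ((xs.length : Int) - j + n - 1) / n = ((xs.length : Int) - j - 1) / n + 1 := by
    rw [show ((xs.length : Int) - j + n - 1) = ((xs.length : Int) - j - 1) + 1 * n by ring,
      Int.add_mul_ediv_right _ _ (show (n:Int) ≠ 0 by omega)]
  by_cases hend : xs.length ≤ j + n
  · -- the slice has exactly one element
    have hmin2 : min ((j + n : Nat) : Int) (xs.length : Int) = (xs.length : Int) := by
      push_cast; omega
    rw [hmin2, if_neg (show ¬ ((xs.length : Int) < (xs.length : Int)) by omega)]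
    have hd0 : ((xs.length : Int) - j - 1) / n = 0 :=
      Int.ediv_eq_zero_of_lt (by omega) (by omega)
    rw [hdiv, hd0]
    norm_num
    simp [List.getElem?_eq_getElem hj]
  · -- first element, then the same slice starting at j + n
    have hmin2 : min ((j + n : Nat) : Int) (xs.length : Int) = ((j + n : Nat) : Int) := by
      push_cast; omega
    rw [hmin2, if_pos (show ((j + n : Nat) : Int) < (xs.length : Int) by push_cast; omega)]
    have hnum : ((xs.length : Int) - ((j + n : Nat) : Int) + n - 1) = (xs.length : Int) - j - 1 := by
      push_cast; ring
    rw [hnum, hdiv]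
    have hge : 0 ≤ ((xs.length : Int) - j - 1) / n := Int.ediv_nonneg (by omega) (by omega)
    rw [Int.toNat_add hge (by omega), show Int.toNat 1 = 1 from rfl, List.range_succ_eq_map]
    simp only [List.filterMap_cons, List.filterMap_map, Option.getD_some]
    have hf0 : ((j : Int) + (n : Int) * (0 : Nat)).toNat = j := by push_cast; omega
    rw [hf0, List.getElem?_eq_getElem hj]
    dsimp only
    refine congrArg (fun l => some (xs[j] :: l)) ?_
    apply List.filterMap_congr
    intro k _
    dsimp only [Function.comp]
    congr 2
    push_cast
    ring

lemma sliceSum_nil (j n : Nat) : sliceSum [] j n = 0 := by cases j <;> rfl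

lemma sliceSum_cons_succ (x : Int) (t : List Int) (j n : Nat) :
    sliceSum (x :: t) (j + 1) n = sliceSum t j n := rfl

lemma slice?_sum (xs : List Int) (n : Nat) (hn : 0 < n) : ∀ j : Nat,
    ((PySem.List.slice? xs (some (j : Int)) none (n : Int)).getD []).sum = sliceSum xs j n := by
  intro j
  by_cases hj : j < xs.length
  · have hfuel : xs.length - j ≤ xs.length - j := le_rfl
    -- strong induction on xs.length - j
    generalize hm : xs.length - j = m at hfuel
    clear hfuel
    induction m using Nat.strong_induction_on generalizing j with
    | _ m ih =>
      rw [slice?_step xs n j hn hj, Option.getD_some, List.sum_cons,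
        sliceSum_lt xs j n hn hj]
      congr 1
      by_cases hj2 : j + n < xs.length
      · exact ih (xs.length - (j + n)) (by omega) (j + n) hj2 rfl
      · rw [slice?_empty xs n (j + n) hn (by omega), sliceSum_ge xs (j + n) n (by omega)]
        rfl
  · rw [slice?_empty xs n j hn (by omega), sliceSum_ge xs j n (by omega)]
    rfl

lemma foldA_aux (xs : List Int) (num : Int) (n : Nat) (hn : num = (n : Int)) (hpos : 0 < n) :
    ∀ m, m ≤ n →
    (List.range m).foldl
      (fun k (i : Nat) =>
        match PySem.List.pyRange (i : Int) (PySem.List.len xs) 1 with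
        | [] => k
        | j :: _ =>
          PySem.List.pySetD k (i : Int) (PySem.List.pyGetD k (i : Int) 0 +
            ((PySem.List.slice? xs (some j) none num).getD []).sum))
      (List.replicate n 0)
    = (List.range m).map (fun i => sliceSum xs i n) ++ List.replicate (n - m) 0 := by
  subst hn
  intro m hm
  induction m with
  | zero => simp
  | succ m ih =>
    rw [List.range_succ, List.foldl_append, ih (by omega), List.foldl_cons, List.foldl_nil]
    have hlen1 : ((List.range m).map (fun i => sliceSum xs i n)).length = m := by simp
    by_cases hml : m < xs.length
    · rw [PySem.List.pyRange_one_cons (by simp; omega)]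
      rw [PySem.List.len_eq] at *
      have hget : PySem.List.pyGetD
          ((List.range m).map (fun i => sliceSum xs i n) ++ List.replicate (n - m) 0)
          (m : Int) 0 = 0 := by
        rw [PySem.List.pyGetD_natCast, List.getD_eq_getElem?_getD,
          List.getElem?_append_right (by omega)]
        simp only [hlen1, Nat.sub_self, List.getElem?_replicate]
        rw [if_pos (by omega)]
        rfl
      dsimp only
      rw [hget, PySem.List.pySetD_natCast, zero_add]
      rw [slice?_sum xs n hpos m]
      have hrepl : List.replicate (n - m) (0 : Int) = 0 :: List.replicate (n - (m + 1)) 0 := by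
        rw [show n - m = (n - (m+1)) + 1 by omega, List.replicate_succ]
      rw [hrepl]
      rw [List.set_append_right _ _ (by omega)]
      simp [hlen1, List.map_append]
    · rw [PySem.List.pyRange_one_eq_nil (by simp; omega)]
      dsimp only
      have h0 : sliceSum xs m n = 0 := sliceSum_ge xs m n (by omega)
      have hrepl : List.replicate (n - m) (0 : Int) = 0 :: List.replicate (n - (m + 1)) 0 := by
        rw [show n - m = (n - (m+1)) + 1 by omega, List.replicate_succ]
      rw [hrepl, List.map_append]
      simp [h0]

-- A's loop writes tailored values at increasing indices into the zero list
lemma foldA (xs : List Int) (num : Int) (n : Nat) (hn : num = (n : Int)) (hpos : 0 < n) :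
    (PySem.List.pyRange 0 (n : Int) 1).foldl
      (fun k i =>
        match PySem.List.pyRange i (PySem.List.len xs) 1 with
        | [] => k
        | j :: _ =>
          PySem.List.pySetD k i (PySem.List.pyGetD k i 0 +
            ((PySem.List.slice? xs (some j) none num).getD []).sum))
      (List.replicate n 0)
    = (List.range n).map (fun i => sliceSum xs i n) := by
  rw [PySem.List.pyRange_one, List.foldl_map]
  simp only [zero_add, Int.sub_zero, Int.toNat_natCast]
  have := foldA_aux xs num n hn hpos n le_rfl
  simp only [Nat.sub_self, List.replicate_zero, List.append_nil] at this
  exact this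

-- B's loop from any kassa of length n
lemma map_getD_range (k : List Int) : (List.range k.length).map (fun i => k.getD i 0) = k := by
  apply List.ext_getElem
  · simp
  · intro i h1 h2
    simp [List.getD_eq_getElem?_getD, List.getElem?_eq_getElem h2]

lemma foldB (num : Int) (n : Nat) (hn : num = (n : Int)) (hpos : 0 < n) :
    ∀ (xs : List Int) (s : Nat) (k : List Int), k.length = n →
    (PySem.List.enumerate xs (s : Int)).foldl
      (fun k p =>
        let r := (PySem.Int.mod p.1 num).toNat
        k.set r (k.getD r 0 + p.2)) k
    = (List.range n).map (fun i => k.getD i 0 + accSum xs s n i) := by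
  subst hn
  intro xs
  induction xs with
  | nil =>
    intro s k hk
    simp only [PySem.List.enumerate_nil, List.foldl_nil, accSum, add_zero]
    rw [← hk, map_getD_range]
  | cons x t ih =>
    intro s k hk
    rw [PySem.List.enumerate_cons]
    simp only [List.foldl_cons]
    have hcast : (s : Int) + 1 = ((s + 1 : Nat) : Int) := by push_cast; ring
    have hmod : (PySem.Int.mod (s : Int) (n : Int)).toNat = s % n := by
      rw [PySem.Int.mod_natCast]; exact Int.toNat_natCast _
    rw [hcast]
    have hlen : (k.set ((PySem.Int.mod (s : Int) (n : Int)).toNat)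
        (k.getD ((PySem.Int.mod (s : Int) (n : Int)).toNat) 0 + x)).length = n := by
      simp [hk]
    rw [ih (s + 1) _ hlen]
    apply List.map_congr_left
    intro i hi
    simp only [List.mem_range] at hi
    rw [hmod]
    have hsn : s % n < n := Nat.mod_lt _ hpos
    rw [accSum]
    by_cases heq : s % n = i
    · subst heq
      rw [List.getD_eq_getElem?_getD, List.getElem?_set_self (by omega), if_pos (by omega)]
      simp [List.getD_eq_getElem?_getD]
      ring
    · rw [List.getD_eq_getElem?_getD, List.getElem?_set_ne heq]
      rw [if_neg heq, List.getD_eq_getElem?_getD]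
      ring

-- accSum equals a shifted sliceSum
lemma acc_eq_slice (n : Nat) (hn : 0 < n) : ∀ (xs : List Int) (s i : Nat), i < n →
    accSum xs s n i = sliceSum xs (if s % n ≤ i then i - s % n else i + n - s % n) n := by
  intro xs
  induction xs with
  | nil => intro s i _; simp [accSum, sliceSum_nil]
  | cons x t ih =>
    intro s i hi
    have hr : s % n < n := Nat.mod_lt _ hn
    have hr1 : (s + 1) % n = (s % n + 1) % n := by
      conv_lhs => rw [← Nat.mod_add_div s n]
      rw [Nat.add_right_comm, Nat.add_mul_mod_self_left]
    have hr2 : (s + 1) % n = if s % n + 1 = n then 0 else s % n + 1 := by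
      split_ifs with h
      · rw [hr1, h, Nat.mod_self]
      · rw [hr1, Nat.mod_eq_of_lt (by omega)]
    have ihs := ih (s + 1) i hi
    rw [hr2] at ihs
    rw [accSum, ihs]
    rcases Nat.lt_trichotomy (s % n) i with hlt | heq | hgt
    · -- r < i : untouched element, both sides drop one position
      rw [if_neg (by omega)]
      have e1 : (if (if s % n + 1 = n then 0 else s % n + 1) ≤ i then
          i - (if s % n + 1 = n then 0 else s % n + 1) else
          i + n - (if s % n + 1 = n then 0 else s % n + 1)) = i - s % n - 1 := by
        split_ifs <;> omega
      have e2 : (if s % n ≤ i then i - s % n else i + n - s % n) = (i - s % n - 1) + 1 := by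
        split_ifs <;> omega
      rw [e1, e2, sliceSum_cons_succ]
      ring
    · -- r = i : this element belongs to class i
      rw [if_pos heq]
      have e2 : (if s % n ≤ i then i - s % n else i + n - s % n) = 0 := by simp [heq]
      rw [e2]
      show x + sliceSum t _ n = sliceSum (x :: t) 0 n
      rw [show sliceSum (x :: t) 0 n = x + sliceSum t (n - 1) n from rfl]
      congr 1
      have e1 : (if (if s % n + 1 = n then 0 else s % n + 1) ≤ i then
          i - (if s % n + 1 = n then 0 else s % n + 1) else
          i + n - (if s % n + 1 = n then 0 else s % n + 1)) = n - 1 := by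
        split_ifs <;> omega
      rw [e1]
    · -- r > i
      rw [if_neg (by omega)]
      have e1 : (if (if s % n + 1 = n then 0 else s % n + 1) ≤ i then
          i - (if s % n + 1 = n then 0 else s % n + 1) else
          i + n - (if s % n + 1 = n then 0 else s % n + 1)) = i + n - s % n - 1 := by
        split_ifs <;> omega
      have e2 : (if s % n ≤ i then i - s % n else i + n - s % n) = (i + n - s % n - 1) + 1 := by
        split_ifs <;> omega
      rw [e1, e2, sliceSum_cons_succ]
      ring

-- ===== VERDICT (by name: the statement is the Claim_ definition above) =====
theorem queue_time2_spec : Claim_equal_queue_time2 := by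
  intro in_list num _ hpre
  unfold Pre_queue_time2 at hpre
  unfold Spec_queue_time2 queue_time2 queue_time2_alt
  obtain ⟨n, hn, hpos⟩ : ∃ n : Nat, num = (n : Int) ∧ 0 < n :=
    ⟨num.toNat, by omega, by omega⟩
  have hrep : num.toNat = n := by omega
  have hA := foldA in_list num n hn hpos
  have hB := foldB num n hn hpos in_list 0 (List.replicate n 0) (by simp)
  simp only [PySem.List.len_eq] at hA
  simp only [Nat.cast_zero] at hB
  simp only [hrep, PySem.List.len_eq, List.length_replicate]
  rw [hn] at hA hB ⊢
  rw [hA, hB]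
  have hmap : (List.range n).map (fun i => sliceSum in_list i n)
      = (List.range n).map (fun i => (List.replicate n (0:Int)).getD i 0 + accSum in_list 0 n i) := by
    apply List.map_congr_left
    intro i hi
    simp only [List.mem_range] at hi
    rw [acc_eq_slice n hpos in_list 0 i hi]
    simp
  rw [hmap]
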